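-- pv_equiv track=rewrite | github.com/Szilagyi001/Python-Younges-Oldest | YoungOldFILNAL_usingFiles.py | findtheYoungest
-- ===== SOURCE A (Python) =====
-- def findtheYoungest(ages, firstnames):
--     youngestAge= ages[0]
--     youngestName=firstnames[0]
--
--     for counter in range(1,len(firstnames)):
--        if  ages[counter] < youngestAge:
--            youngestAge=ages[counter]
--            youngestName=firstnames[counter]
--     return youngestAge, youngestName
-- ===== SOURCE B (Python) =====
-- def findtheYoungest(ages, firstnames):
--     # sort the name indices by age; stable sort keeps the earliest index
--     # first among equal minimum ages, matching A's strict-< scan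
--     idx = sorted(range(len(firstnames)), key=lambda i: ages[i])
--     j = idx[0]
--     return ages[j], firstnames[j]
-- ===== Notes on version B (the rewrite author's own statement) =====
-- stated objective: alternative
-- what changed: B replaces A's left-to-right running-minimum scan by a stable sort of the name indices keyed by age, taking the first sorted index (stability reproduces A's strict-< first-occurrence tie-break).
import Mathlib
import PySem

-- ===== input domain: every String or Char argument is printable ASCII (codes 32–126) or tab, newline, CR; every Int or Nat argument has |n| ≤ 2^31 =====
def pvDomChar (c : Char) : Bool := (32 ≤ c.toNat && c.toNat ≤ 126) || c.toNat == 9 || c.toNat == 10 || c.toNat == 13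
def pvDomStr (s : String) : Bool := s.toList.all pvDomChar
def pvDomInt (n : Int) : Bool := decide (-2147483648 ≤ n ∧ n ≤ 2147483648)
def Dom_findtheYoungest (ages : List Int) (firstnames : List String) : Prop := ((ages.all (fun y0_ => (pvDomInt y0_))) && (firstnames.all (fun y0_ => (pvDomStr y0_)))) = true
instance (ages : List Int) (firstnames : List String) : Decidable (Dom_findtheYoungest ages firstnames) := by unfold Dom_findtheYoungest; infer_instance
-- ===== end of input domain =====

-- B replaces A's linear scan by a stable sort of the name indices keyed by age and
-- takes the first index (alternative decomposition; not claimed faster).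

-- ===== PORT A =====
-- ages[i] / firstnames[i] are ported as pyGet? with a .getD default; Pre_ excludes the
-- inputs (empty firstnames, ages shorter than firstnames) where Python raises IndexError,
-- so the defaults are never observed inside Pre_.
def findtheYoungest (ages : List Int) (firstnames : List String) : Int × String :=
  (PySem.List.pyRange 1 (firstnames.length : Int) 1).foldl
    (fun (st : Int × String) counter =>
      if (PySem.List.pyGet? ages counter).getD 0 < st.1 then
        ((PySem.List.pyGet? ages counter).getD 0,
         (PySem.List.pyGet? firstnames counter).getD "")
      else st)
    ((PySem.List.pyGet? ages 0).getD 0, (PySem.List.pyGet? firstnames 0).getD "")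

-- ===== PORT B =====
def findtheYoungest_alt (ages : List Int) (firstnames : List String) : Int × String :=
  let idx := PySem.List.sorted (PySem.List.pyRange 0 (firstnames.length : Int) 1)
      (fun i => (PySem.List.pyGet? ages i).getD 0) false
  let j := (PySem.List.pyGet? idx 0).getD 0
  ((PySem.List.pyGet? ages j).getD 0, (PySem.List.pyGet? firstnames j).getD "")

-- ===== PRECONDITION & SPEC =====
-- Exactly where Python A returns: firstnames nonempty (else firstnames[0]/ages[0] raises
-- IndexError) and ages at least as long as firstnames (else ages[counter] raises).
def Pre_findtheYoungest (ages : List Int) (firstnames : List String) : Prop :=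
  firstnames ≠ [] ∧ firstnames.length ≤ ages.length
instance (ages : List Int) (firstnames : List String) : Decidable (Pre_findtheYoungest ages firstnames) := by unfold Pre_findtheYoungest; infer_instance
def pvWitness_findtheYoungest : List Int × List String := ([5, 3, 3], ["ann", "bob", "cal"])

def Spec_findtheYoungest (ages : List Int) (firstnames : List String) (out : Int × String) : Prop := out = findtheYoungest_alt ages firstnames
instance (ages : List Int) (firstnames : List String) (out : Int × String) : Decidable (Spec_findtheYoungest ages firstnames out) := by unfold Spec_findtheYoungest; infer_instance

-- ===== CLAIM (what is proved, stated in full; the proofs are below) =====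
def Claim_equal_findtheYoungest : Prop := ∀ (ages : List Int) (firstnames : List String), Dom_findtheYoungest ages firstnames → Pre_findtheYoungest ages firstnames → Spec_findtheYoungest ages firstnames (findtheYoungest ages firstnames)

-- ===== LEMMAS AND PROOFS =====

-- Head of the insertion-sort fold over a nonempty accumulator: the head is the
-- strict-< fold of the keys (stability: ties keep the earlier element).
theorem head_foldl_insertBy {α : Type} (key : α → Int) :
    ∀ (l : List α) (m : α) (t : List α), ∃ t',
      l.foldl (fun acc x => PySem.List.insertBy (fun a b => decide (key a < key b)) x acc) (m :: t)
        = (l.foldl (fun m x => if key x < key m then x else m) m) :: t' := by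
  intro l
  induction l with
  | nil => intro m t; exact ⟨t, rfl⟩
  | cons x l ih =>
    intro m t
    simp only [List.foldl_cons, PySem.List.insertBy]
    by_cases h : key x < key m
    · simpa [h] using ih x (m :: t)
    · simpa [h] using ih m (PySem.List.insertBy (fun a b => decide (key a < key b)) x t)

-- A's pair-state fold computes (key J, name J) for J the strict-< arg-min fold.
theorem fold_pair (key : Int → Int) (name : Int → String) :
    ∀ (l : List Int) (j : Int),
      l.foldl (fun (st : Int × String) i => if key i < st.1 then (key i, name i) else st) (key j, name j)
        = (key (l.foldl (fun m i => if key i < key m then i else m) j),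
           name (l.foldl (fun m i => if key i < key m then i else m) j)) := by
  intro l
  induction l with
  | nil => intro j; rfl
  | cons i l ih =>
    intro j
    by_cases h : key i < key j
    · simpa [h] using ih i
    · simpa [h] using ih j

-- ===== VERDICT (by name: the statement is the Claim_ definition above) =====
theorem findtheYoungest_spec : Claim_equal_findtheYoungest := by
  intro ages firstnames _ hpre
  unfold Spec_findtheYoungest findtheYoungest findtheYoungest_alt
  have hn : (0 : Int) < (firstnames.length : Int) := by
    rcases hpre with ⟨h1, _⟩
    have : 0 < firstnames.length := List.length_pos_iff.mpr h1
    exact_mod_cast this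
  set key : Int → Int := fun i => (PySem.List.pyGet? ages i).getD 0 with hkey
  set name : Int → String := fun i => (PySem.List.pyGet? firstnames i).getD "" with hname
  -- B's sorted index list starts with the strict-< arg-min index J
  have hrange : PySem.List.pyRange 0 (firstnames.length : Int) 1
      = 0 :: PySem.List.pyRange 1 (firstnames.length : Int) 1 :=
    PySem.List.pyRange_one_cons hn
  obtain ⟨t', ht'⟩ := head_foldl_insertBy key (PySem.List.pyRange 1 (firstnames.length : Int) 1) 0 []
  have hsorted : PySem.List.sorted (PySem.List.pyRange 0 (firstnames.length : Int) 1) key false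
      = ((PySem.List.pyRange 1 (firstnames.length : Int) 1).foldl
          (fun m i => if key i < key m then i else m) 0) :: t' := by
    rw [PySem.List.sorted_eq_foldl_insertBy, hrange, List.foldl_cons]
    simpa [PySem.List.insertBy] using ht'
  simp only [hsorted, PySem.List.pyGet?_zero_cons, Option.getD_some]
  -- A's fold with pair state equals (key J, name J)
  have hinit : ((PySem.List.pyGet? ages 0).getD 0, (PySem.List.pyGet? firstnames 0).getD "")
      = (key 0, name 0) := rfl
  rw [hinit]
  exact fold_pair key name (PySem.List.pyRange 1 (firstnames.length : Int) 1) 0
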